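-- pv_equiv track=rewrite | github.com/welbornprod/colr | colr/trans.py | rgb2termhex
-- ===== SOURCE A (Python) =====
-- def rgb2hex(r: int, g: int, b: int) -> str:
--     """ Convert rgb values to a hex code. """
--     return '{:02x}{:02x}{:02x}'.format(r, g, b)
--
-- def rgb2termhex(r: int, g: int, b: int) -> str:
--     """ Convert an rgb value to the nearest hex value that matches a term code.
--         The hex value will be one in `hex2term_map`.
--     """
--     incs = [0x00, 0x5f, 0x87, 0xaf, 0xd7, 0xff]
--
--     res = []
--     parts = r, g, b
--     for part in parts:
--         if (part < 0) or (part > 255):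
--             raise ValueError(
--                 'Expecting 0-255 for RGB code, got: {!r}'.format(parts)
--             )
--         i = 0
--         while i < len(incs) - 1:
--             s, b = incs[i], incs[i + 1]  # smaller, bigger
--             if s <= part <= b:
--                 s1 = abs(s - part)
--                 b1 = abs(b - part)
--                 if s1 < b1:
--                     closest = s
--                 else:
--                     closest = b
--                 res.append(closest)
--                 break
--             i += 1
--
--     # Convert back into nearest hex value.
--     return rgb2hex(*res)
-- ===== SOURCE B (Python) =====
-- def rgb2termhex(r: int, g: int, b: int) -> str:
--     """ Snap (r, g, b) to the nearest terminal-palette hex via a closed-form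
--         formula: the palette is 0 then an arithmetic run 95,135,...,255, so the
--         nearest value (ties toward the larger one) is computed, not searched.
--     """
--     parts = r, g, b
--     for part in parts:
--         if (part < 0) or (part > 255):
--             raise ValueError(
--                 'Expecting 0-255 for RGB code, got: {!r}'.format(parts)
--             )
--     return ''.join(
--         '{:02x}'.format(0 if p < 48 else 95 + 40 * max(0, (p - 75) // 40))
--         for p in parts
--     )
-- ===== Notes on version B (the rewrite author's own statement) =====
-- stated objective: simpler
-- what changed: Replaces the per-channel while-loop interval scan over the palette with a closed-form arithmetic formula (the palette above 0 is the arithmetic run 95+40k, so the nearest value with ties toward the larger endpoint is computed directly).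
import Mathlib
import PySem

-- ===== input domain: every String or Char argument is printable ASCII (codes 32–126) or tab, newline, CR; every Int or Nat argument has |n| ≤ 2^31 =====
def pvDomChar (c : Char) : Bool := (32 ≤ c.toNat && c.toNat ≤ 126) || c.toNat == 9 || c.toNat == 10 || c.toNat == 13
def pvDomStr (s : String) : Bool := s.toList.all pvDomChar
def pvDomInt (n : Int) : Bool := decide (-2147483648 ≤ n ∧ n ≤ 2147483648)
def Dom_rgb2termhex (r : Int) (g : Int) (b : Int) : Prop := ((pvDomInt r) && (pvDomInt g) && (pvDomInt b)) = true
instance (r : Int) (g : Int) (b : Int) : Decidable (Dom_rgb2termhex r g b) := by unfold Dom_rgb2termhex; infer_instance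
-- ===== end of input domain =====

-- B replaces A's per-channel while-loop scan over palette intervals with a
-- closed-form arithmetic formula (objective: simpler). Return-value equivalence
-- proved on Pre_ (the inputs where A does not raise ValueError).

-- ===== PORT A =====

-- '{:02x}'.format(n) for one byte (A side): two lowercase hex digits
def pvHexDigitA (d : Int) : Char :=
  if d < 10 then Char.ofNat ('0'.toNat + d.toNat) else Char.ofNat ('a'.toNat + (d - 10).toNat)

def rgb2hexA (r g b : Int) : String :=
  String.ofList [pvHexDigitA (PySem.Int.floordiv r 16), pvHexDigitA (PySem.Int.mod r 16),
             pvHexDigitA (PySem.Int.floordiv g 16), pvHexDigitA (PySem.Int.mod g 16),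
             pvHexDigitA (PySem.Int.floordiv b 16), pvHexDigitA (PySem.Int.mod b 16)]

def incsA : List Int := [0x00, 0x5f, 0x87, 0xaf, 0xd7, 0xff]

-- the `while i < len(incs) - 1` loop for one part; fuel makes it total (Python
-- terminates because the intervals cover 0..255; for a covered part the break fires)
def loopA (part : Int) : Nat → Nat → List Int → List Int
  | 0, _, res => res
  | fuel + 1, i, res =>
    if i < incsA.length - 1 then
      let s := incsA.getD i 0
      let b := incsA.getD (i + 1) 0
      if s ≤ part ∧ part ≤ b then
        let s1 := |s - part|
        let b1 := |b - part|
        let closest := if s1 < b1 then s else b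
        res ++ [closest]   -- append then break
      else
        loopA part fuel (i + 1) res
    else res

-- the range check on one part: `raise ValueError` becomes none
def stepA (res : List Int) (part : Int) : Option (List Int) :=
  if part < 0 ∨ part > 255 then none
  else some (loopA part 5 0 res)

def rgb2termhex (r : Int) (g : Int) (b : Int) : String :=
  match (stepA [] r).bind (fun res => (stepA res g).bind (fun res => stepA res b)) with
  | some [x, y, z] => rgb2hexA x y z
  | _ => ""   -- ValueError path (excluded by Pre_) / unreachable shape

-- ===== PORT B =====

-- '{:02x}'.format(n) for one byte (B side)
def pvHexDigitB (d : Int) : Char :=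
  if d < 10 then Char.ofNat ('0'.toNat + d.toNat) else Char.ofNat ('a'.toNat + (d - 10).toNat)

def hx2B (n : Int) : String :=
  String.ofList [pvHexDigitB (PySem.Int.floordiv n 16), pvHexDigitB (PySem.Int.mod n 16)]

-- closed-form nearest palette value, ties toward the larger endpoint
def snapB (p : Int) : Int :=
  if p < 48 then 0 else 95 + 40 * max 0 (PySem.Int.floordiv (p - 75) 40)

def rgb2termhex_alt (r : Int) (g : Int) (b : Int) : String :=
  if r < 0 ∨ r > 255 ∨ g < 0 ∨ g > 255 ∨ b < 0 ∨ b > 255 then ""  -- ValueError (excluded by Pre_)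
  else hx2B (snapB r) ++ hx2B (snapB g) ++ hx2B (snapB b)

-- ===== PRECONDITION & SPEC =====
-- Pre_: exactly the inputs on which A returns (A raises ValueError off 0..255)
def Pre_rgb2termhex (r : Int) (g : Int) (b : Int) : Prop :=
  0 ≤ r ∧ r ≤ 255 ∧ 0 ≤ g ∧ g ≤ 255 ∧ 0 ≤ b ∧ b ≤ 255
instance (r : Int) (g : Int) (b : Int) : Decidable (Pre_rgb2termhex r g b) := by
  unfold Pre_rgb2termhex; infer_instance

def pvWitness_rgb2termhex : Int × Int × Int := (10, 128, 250)

def Spec_rgb2termhex (r : Int) (g : Int) (b : Int) (out : String) : Prop := out = rgb2termhex_alt r g b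
instance (r : Int) (g : Int) (b : Int) (out : String) : Decidable (Spec_rgb2termhex r g b out) := by unfold Spec_rgb2termhex; infer_instance

-- ===== CLAIM (what is proved, stated in full; the proofs are below) =====
def Claim_equal_rgb2termhex : Prop := ∀ (r : Int) (g : Int) (b : Int), Dom_rgb2termhex r g b → Pre_rgb2termhex r g b → Spec_rgb2termhex r g b (rgb2termhex r g b)

-- ===== LEMMAS AND PROOFS =====

-- the loop only appends: pull the accumulator out
theorem loopA_append (part : Int) : ∀ (fuel i : Nat) (res : List Int),
    loopA part fuel i res = res ++ loopA part fuel i [] := by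
  intro fuel
  induction fuel with
  | zero => intro i res; simp [loopA]
  | succ n ih =>
    intro i res
    simp only [loopA]
    split
    · split
      · simp
      · rw [ih (i + 1) res]
    · simp

-- per-byte agreement of A's scan with B's closed form, checked over 0..255
set_option maxRecDepth 40000 in
theorem perByte : ∀ n : Nat, n < 256 → loopA (n : Int) 5 0 [] = [snapB (n : Int)] := by
  decide

theorem loopA_eq_snap (p : Int) (h0 : 0 ≤ p) (h1 : p ≤ 255) : loopA p 5 0 [] = [snapB p] := by
  have hp : p = (p.toNat : Int) := (Int.toNat_of_nonneg h0).symm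
  have hlt : p.toNat < 256 := by omega
  rw [hp]; exact perByte p.toNat hlt

theorem hex_split (x y z : Int) : rgb2hexA x y z = hx2B x ++ hx2B y ++ hx2B z := by
  simp [rgb2hexA, hx2B, pvHexDigitA, pvHexDigitB, ← String.ofList_append]

theorem rgb2termhex_spec : Claim_equal_rgb2termhex := by
  intro r g b _ hpre
  obtain ⟨hr0, hr1, hg0, hg1, hb0, hb1⟩ := hpre
  unfold Spec_rgb2termhex rgb2termhex rgb2termhex_alt stepA
  have hrc : ¬ (r < 0 ∨ r > 255) := by omega
  have hgc : ¬ (g < 0 ∨ g > 255) := by omega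
  have hbc : ¬ (b < 0 ∨ b > 255) := by omega
  simp only [if_neg hrc, if_neg hgc, if_neg hbc, Option.bind]
  rw [loopA_eq_snap r hr0 hr1,
      loopA_append g, loopA_eq_snap g hg0 hg1,
      loopA_append b, loopA_eq_snap b hb0 hb1]
  have : ¬ (r < 0 ∨ r > 255 ∨ g < 0 ∨ g > 255 ∨ b < 0 ∨ b > 255) := by omega
  simp only [List.cons_append, List.nil_append, if_neg this]
  exact hex_split (snapB r) (snapB g) (snapB b)
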